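-- pv_equiv track=rewrite | github.com/SauersML/ferromic | stats/CDS_plots.py | collapse_unique_sequences
-- ===== SOURCE A (Python) =====
-- from collections import defaultdict, Counter
--
-- def collapse_unique_sequences(seq_dict: dict, orientations: dict):
--     seq_to_members = defaultdict(list)
--     for name, seq in seq_dict.items():
--         seq_to_members[seq].append(name)
--     unique_list, members, multiplicity, orient_counts = [], [], [], []
--     for seq, mems in seq_to_members.items():
--         unique_list.append(seq)
--         members.append(mems)
--         multiplicity.append(len(mems))
--         d_count = sum(1 for nm in mems if orientations.get(nm) == "D")
--         i_count = sum(1 for nm in mems if orientations.get(nm) == "I")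
--         orient_counts.append((d_count, i_count))
--     return unique_list, members, multiplicity, orient_counts
-- ===== SOURCE B (Python) =====
-- def collapse_unique_sequences(seq_dict: dict, orientations: dict):
--     # One pass: an index map from sequence to its slot in the parallel output
--     # lists, with running member lists, multiplicities and D/I tallies.
--     index = {}
--     unique_list, members, multiplicity, counts = [], [], [], []
--     for name, seq in seq_dict.items():
--         o = orientations.get(name)
--         d = 1 if o == "D" else 0
--         i = 1 if o == "I" else 0
--         j = index.get(seq)
--         if j is None:
--             index[seq] = len(unique_list)
--             unique_list.append(seq)
--             members.append([name])
--             multiplicity.append(1)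
--             counts.append([d, i])
--         else:
--             members[j].append(name)
--             multiplicity[j] += 1
--             c = counts[j]
--             c[0] += d
--             c[1] += i
--     return unique_list, members, multiplicity, [tuple(c) for c in counts]
-- ===== Notes on version B (the rewrite author's own statement) =====
-- stated objective: alternative
-- what changed: Replaces the two-phase group-then-rescan (build seq->members dict, then per group recount orientations by scanning its member list twice) with a single pass that keeps a seq->slot index map and updates running member lists, multiplicities and D/I tallies in place.
import Mathlib
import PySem

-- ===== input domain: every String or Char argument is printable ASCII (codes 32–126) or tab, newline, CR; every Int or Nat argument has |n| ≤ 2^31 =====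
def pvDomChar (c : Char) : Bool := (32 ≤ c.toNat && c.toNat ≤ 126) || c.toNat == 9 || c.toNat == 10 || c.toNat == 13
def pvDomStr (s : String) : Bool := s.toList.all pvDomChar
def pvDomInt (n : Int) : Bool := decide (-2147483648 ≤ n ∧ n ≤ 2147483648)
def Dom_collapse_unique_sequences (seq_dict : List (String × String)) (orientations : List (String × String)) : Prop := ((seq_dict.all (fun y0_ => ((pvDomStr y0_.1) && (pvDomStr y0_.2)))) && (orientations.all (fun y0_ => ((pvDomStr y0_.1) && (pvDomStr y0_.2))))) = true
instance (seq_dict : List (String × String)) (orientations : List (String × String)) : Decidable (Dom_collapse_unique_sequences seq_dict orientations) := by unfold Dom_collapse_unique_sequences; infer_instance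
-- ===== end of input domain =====

-- B replaces A's group-then-rescan (dict of members, then two counting scans per
-- group) by a single pass with a seq->slot index map and running tallies (alternative decomposition).


-- ===== PORT A =====
def collapse_unique_sequences (seq_dict : List (String × String)) (orientations : List (String × String)) : List String × List (List String) × List Int × (List (Int × Int)) :=
  let orient : PySem.Dict String String := PySem.Dict.mk orientations
  let seq_to_members : PySem.Dict String (List String) :=
    seq_dict.foldl (fun d p => d.modify p.2 [] (fun ms => ms ++ [p.1])) PySem.Dict.empty
  seq_to_members.items.foldl
    (fun acc p =>
      (acc.1 ++ [p.1],
       acc.2.1 ++ [p.2],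
       acc.2.2.1 ++ [(p.2.length : Int)],
       acc.2.2.2 ++ [((p.2.map (fun nm => if orient.get? nm == some "D" then (1:Int) else 0)).sum,
                      (p.2.map (fun nm => if orient.get? nm == some "I" then (1:Int) else 0)).sum)]))
    ([], [], [], [])

-- ===== PORT B =====
-- B-side helper: one step of B's single pass (state: index map, unique_list, members, multiplicity, counts)
def pvAltStep (orient : PySem.Dict String String)
    (st : PySem.Dict String Nat × List String × List (List String) × List Int × List (Int × Int))
    (p : String × String) :
    PySem.Dict String Nat × List String × List (List String) × List Int × List (Int × Int) :=
  let o := orient.get? p.1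
  let d : Int := if o == some "D" then 1 else 0
  let i : Int := if o == some "I" then 1 else 0
  match st.1.get? p.2 with
  | none =>
      (st.1.insert p.2 st.2.1.length,
       st.2.1 ++ [p.2],
       st.2.2.1 ++ [[p.1]],
       st.2.2.2.1 ++ [(1 : Int)],
       st.2.2.2.2 ++ [(d, i)])
  | some j =>
      (st.1,
       st.2.1,
       st.2.2.1.set j (st.2.2.1.getD j [] ++ [p.1]),
       st.2.2.2.1.set j (st.2.2.2.1.getD j 0 + 1),
       st.2.2.2.2.set j ((st.2.2.2.2.getD j (0, 0)).1 + d, (st.2.2.2.2.getD j (0, 0)).2 + i))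

def collapse_unique_sequences_alt (seq_dict : List (String × String)) (orientations : List (String × String)) : List String × List (List String) × List Int × (List (Int × Int)) :=
  let st := seq_dict.foldl (pvAltStep (PySem.Dict.mk orientations)) (PySem.Dict.empty, [], [], [], [])
  (st.2.1, st.2.2.1, st.2.2.2.1, st.2.2.2.2)

-- ===== PRECONDITION & SPEC =====
def Spec_collapse_unique_sequences (seq_dict : List (String × String)) (orientations : List (String × String)) (out : List String × List (List String) × List Int × (List (Int × Int))) : Prop := out = collapse_unique_sequences_alt seq_dict orientations
instance (seq_dict : List (String × String)) (orientations : List (String × String)) (out : List String × List (List String) × List Int × (List (Int × Int))) : Decidable (Spec_collapse_unique_sequences seq_dict orientations out) := by unfold Spec_collapse_unique_sequences; infer_instance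

-- ===== CLAIM (what is proved, stated in full; the proofs are below) =====
def Claim_equal_collapse_unique_sequences : Prop := ∀ (seq_dict : List (String × String)) (orientations : List (String × String)), Dom_collapse_unique_sequences seq_dict orientations → Spec_collapse_unique_sequences seq_dict orientations (collapse_unique_sequences seq_dict orientations)

-- ===== LEMMAS AND PROOFS =====

-- A's grouping dict (the fold A performs over seq_dict)
def pvGroups (l : List (String × String)) : PySem.Dict String (List String) :=
  l.foldl (fun d p => d.modify p.2 [] (fun ms => ms ++ [p.1])) PySem.Dict.empty

-- the 0/1-sum A computes for one tag over one member list
def pvCnt (orient : PySem.Dict String String) (tag : String) (ms : List String) : Int :=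
  (ms.map (fun nm => if orient.get? nm == some tag then (1:Int) else 0)).sum

lemma pvGroups_nodup (l : List (String × String)) : (pvGroups l).keys.Nodup :=
  PySem.Dict.nodup_keys_foldl_modify_key l (·.2) [] (fun _ x ms => ms ++ [x.1]) PySem.Dict.empty (by simp)

lemma get?_mk_zipIdx (l : List String) (k : String) (n : Nat) :
    (PySem.Dict.mk (l.zipIdx n)).get? k = (l.idxOf? k).map (· + n) := by
  induction l generalizing n with
  | nil => simp [PySem.Dict.get?]
  | cons a t ih =>
    rw [List.zipIdx_cons, PySem.Dict.get?_mk_cons, List.idxOf?_cons]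
    by_cases h : a == k
    · simp [h]
    · simp only [h, Bool.false_eq_true, ite_false, ih]
      cases ht : t.idxOf? k with
      | none => simp
      | some m => simp; omega

lemma pvIdxOf?_getElem (l : List String) (a : String) (j : Nat) (h : l.idxOf? a = some j) :
    ∃ hj : j < l.length, l[j] = a := by
  rw [List.idxOf?] at h
  obtain ⟨hj, h1, -⟩ := List.findIdx?_eq_some_iff_getElem.mp h
  exact ⟨hj, by simpa using h1⟩

lemma pvMapIfSet {α : Type} (items : List (String × α)) (k : String) (v : α) (j : Nat)
    (hnd : (items.map Prod.fst).Nodup) (hj : j < items.length) (hk : (items[j]).1 = k) :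
    items.map (fun q => if q.1 == k then (k, v) else q) = items.set j (k, v) := by
  induction items generalizing j with
  | nil => simp at hj
  | cons a t ih =>
    simp only [List.map_cons, List.nodup_cons] at hnd
    cases j with
    | zero =>
      simp only [List.getElem_cons_zero] at hk
      have ht : t.map (fun q => if q.1 == k then (k, v) else q) = t := by
        conv_rhs => rw [← List.map_id t]
        apply List.map_congr_left  -- elements of t never have key k
        intro q hq
        have hne : q.1 ≠ k := by
          intro hmem
          exact hnd.1 (hk ▸ hmem ▸ List.mem_map_of_mem hq)
        simp [hne]
      simp only [List.map_cons, List.set_cons_zero, ht]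
      rw [if_pos (by simp [hk])]
    | succ j =>
      simp only [List.getElem_cons_succ] at hk
      have ha : a.1 ≠ k := by
        intro he
        have : k ∈ t.map Prod.fst := hk ▸ List.mem_map_of_mem (List.getElem_mem _)
        exact hnd.1 (he ▸ this)
      simp only [List.map_cons, List.set_cons_succ]
      rw [if_neg (by simp [ha]), ih j hnd.2 (by simpa using hj) hk]

-- A's output fold, in closed form
lemma pvA_out (orient : PySem.Dict String String) (items : List (String × List String))
    (acc : List String × List (List String) × List Int × List (Int × Int)) :
    items.foldl
      (fun acc p =>
        (acc.1 ++ [p.1],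
         acc.2.1 ++ [p.2],
         acc.2.2.1 ++ [(p.2.length : Int)],
         acc.2.2.2 ++ [((p.2.map (fun nm => if orient.get? nm == some "D" then (1:Int) else 0)).sum,
                        (p.2.map (fun nm => if orient.get? nm == some "I" then (1:Int) else 0)).sum)]))
      acc =
    (acc.1 ++ items.map (·.1),
     acc.2.1 ++ items.map (·.2),
     acc.2.2.1 ++ items.map (fun p => (p.2.length : Int)),
     acc.2.2.2 ++ items.map (fun p => (pvCnt orient "D" p.2, pvCnt orient "I" p.2))) := by
  induction items generalizing acc with
  | nil => simp
  | cons a t ih => rw [List.foldl_cons, ih]; simp [pvCnt]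

-- B's loop invariant: the whole state is determined by A's grouping dict
lemma pvB_inv (orient : PySem.Dict String String) (l : List (String × String)) :
    l.foldl (pvAltStep orient) (PySem.Dict.empty, [], [], [], []) =
    (PySem.Dict.mk ((pvGroups l).keys.zipIdx),
     (pvGroups l).keys,
     (pvGroups l).values,
     (pvGroups l).values.map (fun ms => (ms.length : Int)),
     (pvGroups l).values.map (fun ms => (pvCnt orient "D" ms, pvCnt orient "I" ms))) := by
  induction l using List.reverseRecOn with
  | nil =>
    simp [pvGroups, PySem.Dict.empty, PySem.Dict.keys, PySem.Dict.values]
  | append_singleton l p ih =>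
    have hg : pvGroups (l ++ [p]) = (pvGroups l).modify p.2 [] (fun ms => ms ++ [p.1]) := by
      simp [pvGroups, List.foldl_append]
    have hnd : (pvGroups l).keys.Nodup := pvGroups_nodup l
    have hndi : ((pvGroups l).items.map Prod.fst).Nodup := by
      simpa [PySem.Dict.keys] using hnd
    rw [List.foldl_append, List.foldl_cons, List.foldl_nil, ih, hg, PySem.Dict.modify]
    by_cases hc : (pvGroups l).contains p.2 = true
    · -- the sequence was seen before, at slot j
      have hmem : p.2 ∈ (pvGroups l).keys := (PySem.Dict.contains_iff_mem_keys _ _).mp hc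
      obtain ⟨j, hj⟩ : ∃ j, (pvGroups l).keys.idxOf? p.2 = some j := by
        cases h : (pvGroups l).keys.idxOf? p.2 with
        | none => exact absurd (List.idxOf?_eq_none_iff.mp h) (by simpa using hmem)
        | some j => exact ⟨j, rfl⟩
      obtain ⟨hlt, hkey⟩ := pvIdxOf?_getElem _ _ _ hj
      have hlt' : j < (pvGroups l).items.length := by
        simpa [PySem.Dict.keys] using hlt
      have hkey' : ((pvGroups l).items[j]'hlt').1 = p.2 := by
        simpa [PySem.Dict.keys] using hkey
      have hB : (PySem.Dict.mk ((pvGroups l).keys.zipIdx)).get? p.2 = some j := by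
        rw [get?_mk_zipIdx, hj]; rfl
      have hmi : (p.2, ((pvGroups l).items[j]'hlt').2) ∈ (pvGroups l).items := by
        rw [show (p.2, ((pvGroups l).items[j]'hlt').2) = (pvGroups l).items[j]'hlt' from by
          rw [← hkey']]
        exact List.getElem_mem hlt'
      have hgetD : (pvGroups l).getD p.2 [] = ((pvGroups l).items[j]'hlt').2 :=
        PySem.Dict.getD_of_mem_items _ hmi hnd []
      have hset : ((pvGroups l).insert p.2 ((pvGroups l).getD p.2 [] ++ [p.1])).items =
          (pvGroups l).items.set j (p.2, ((pvGroups l).items[j]'hlt').2 ++ [p.1]) := by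
        rw [PySem.Dict.items_insert_of_contains _ _ hc, hgetD]
        exact pvMapIfSet _ _ _ _ hndi hlt' hkey'
      have hVlt : j < (pvGroups l).values.length := by
        simpa [PySem.Dict.values] using hlt'
      have hVj : (pvGroups l).values[j]'hVlt = ((pvGroups l).items[j]'hlt').2 := by
        simp [PySem.Dict.values]
      have hKset : (pvGroups l).keys.set j p.2 = (pvGroups l).keys := by
        rw [← hkey]; exact List.set_getElem_self hlt
      simp only [PySem.Dict.keys, PySem.Dict.values] at hB hKset hVlt hVj ⊢
      simp only [pvAltStep, hB, hset, List.map_set, List.map_map, Prod.mk.injEq, hKset]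
      refine ⟨trivial, trivial, ?_, ?_, ?_⟩
      · rw [List.getD_eq_getElem _ _ hVlt, hVj]
      · congr 1
        simp [Function.comp, List.getElem?_eq_getElem hlt']
      · congr 1
        simp [Function.comp, pvCnt, List.getElem?_eq_getElem hlt']
    · -- a fresh sequence: everything is appended
      have hcf : (pvGroups l).contains p.2 = false := by simpa using hc
      have hmem : p.2 ∉ (pvGroups l).keys := fun h =>
        hc ((PySem.Dict.contains_iff_mem_keys _ _).mpr h)
      have hB : (PySem.Dict.mk ((pvGroups l).keys.zipIdx)).get? p.2 = none := by
        rw [get?_mk_zipIdx, List.idxOf?_eq_none_iff.mpr hmem]; rfl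
      have hgetD : (pvGroups l).getD p.2 [] = [] :=
        PySem.Dict.getD_of_not_contains _ [] hcf
      have hset : ((pvGroups l).insert p.2 ((pvGroups l).getD p.2 [] ++ [p.1])).items =
          (pvGroups l).items ++ [(p.2, [p.1])] := by
        rw [PySem.Dict.items_insert_of_not_contains _ _ hcf, hgetD]; rfl
      have hcz : (PySem.Dict.mk ((pvGroups l).keys.zipIdx)).contains p.2 = false := by
        rw [PySem.Dict.contains_eq_isSome_get?, hB]; rfl
      have hidx : (PySem.Dict.mk ((pvGroups l).keys.zipIdx)).insert p.2 (pvGroups l).keys.length =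
          PySem.Dict.mk (((pvGroups l).keys ++ [p.2]).zipIdx) := by
        apply PySem.Dict.ext
        rw [PySem.Dict.items_insert_of_not_contains _ _ hcz, List.zipIdx_append]
        simp
      simp only [PySem.Dict.keys, PySem.Dict.values] at hB hcz hidx ⊢
      simp only [pvAltStep, hB, hset, List.map_append, List.map_map, Prod.mk.injEq]
      refine ⟨?_, rfl, rfl, by simp, by simp [pvCnt]⟩
      · simpa using hidx

-- ===== VERDICT (by name: the statement is the Claim_ definition above) =====
theorem collapse_unique_sequences_spec : Claim_equal_collapse_unique_sequences := by
  intro seq_dict orientations _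
  unfold Spec_collapse_unique_sequences collapse_unique_sequences collapse_unique_sequences_alt
  rw [pvB_inv, pvA_out]
  simp [pvGroups, PySem.Dict.keys, PySem.Dict.values, List.map_map, Function.comp]
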